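-- pv_equiv track=rewrite | github.com/flywinged/galactic-factorio | generationScript.py | recede
-- ===== SOURCE A (Python) =====
-- def recede(grid):
--     newGrid = []
--     for i in range(len(grid)):
--         newRow = []
--         for j in range(len(grid)):
--
--             if i == 0 or j == 0 or i == len(grid) - 1 or j == len(grid) - 1:
--                 newRow.append(False)
--                 continue
--
--             if not grid[i-1][j]:
--                 newRow.append(False)
--                 continue
--             if not grid[i][j-1]:
--                 newRow.append(False)
--                 continue
--             if not grid[i+1][j]:
--                 newRow.append(False)
--                 continue
--             if not grid[i][j+1]:
--                 newRow.append(False)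
--                 continue
--             if not grid[i][j]:
--                 newRow.append(False)
--                 continue
--
--             newRow.append(True)
--         newGrid.append(newRow)
--     return newGrid
-- ===== SOURCE B (Python) =====
-- def recede(grid):
--     n = len(grid)
--     cleared = set()
--     for i in range(n):
--         for j in range(n):
--             if not grid[i][j]:
--                 cleared.add((i, j))
--                 cleared.add((i - 1, j))
--                 cleared.add((i + 1, j))
--                 cleared.add((i, j - 1))
--                 cleared.add((i, j + 1))
--     return [[0 < i < n - 1 and 0 < j < n - 1 and (i, j) not in cleared
--              for j in range(n)]
--             for i in range(n)]
-- ===== Notes on version B (the rewrite author's own statement) =====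
-- stated objective: alternative
-- what changed: Instead of testing each cell's 5-cell plus-neighborhood with a short-circuit if-chain, B scatters falseness: one pass collects every False cell and its four orthogonal neighbors into a set of cleared coordinates, and the output marks a cell True iff it is interior and not cleared.
-- outside the precondition, e.g. on recede([[True], [False]]): A returns [[False, False], [False, False]], B raises IndexError
import Mathlib
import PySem

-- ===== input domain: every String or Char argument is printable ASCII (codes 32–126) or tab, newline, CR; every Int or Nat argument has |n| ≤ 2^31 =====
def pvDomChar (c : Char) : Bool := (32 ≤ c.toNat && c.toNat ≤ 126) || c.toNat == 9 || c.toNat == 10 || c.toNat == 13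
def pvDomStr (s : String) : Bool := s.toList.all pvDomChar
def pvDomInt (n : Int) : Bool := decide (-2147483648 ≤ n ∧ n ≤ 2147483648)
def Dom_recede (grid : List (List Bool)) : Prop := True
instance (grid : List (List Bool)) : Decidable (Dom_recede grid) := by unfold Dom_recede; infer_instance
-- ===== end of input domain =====

-- B replaces A's per-cell 5-neighborhood gather (short-circuit if-chain) by one scatter pass
-- collecting a set of cleared coordinates; objective: alternative algorithm, same cost.


-- ===== PORT A =====
-- grid[i][j]: exact where both indices are in range (guaranteed by Pre_recede for every read)
def pyGet2 (g : List (List Bool)) (i j : Int) : Bool :=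
  PySem.List.pyGetD (PySem.List.pyGetD g i []) j false

def recede (grid : List (List Bool)) : List (List Bool) :=
  let n : Int := grid.length
  (PySem.List.pyRange 0 n 1).foldl (fun newGrid i =>
    newGrid ++ [(PySem.List.pyRange 0 n 1).foldl (fun newRow j =>
      newRow ++ [
        if i = 0 ∨ j = 0 ∨ i = n - 1 ∨ j = n - 1 then false
        else if !(pyGet2 grid (i-1) j) then false
        else if !(pyGet2 grid i (j-1)) then false
        else if !(pyGet2 grid (i+1) j) then false
        else if !(pyGet2 grid i (j+1)) then false
        else if !(pyGet2 grid i j) then false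
        else true]) []]) []

-- ===== PORT B =====
def recede_alt (grid : List (List Bool)) : List (List Bool) :=
  let n : Int := grid.length
  let cleared : PySem.Set (Int × Int) :=
    (PySem.List.pyRange 0 n 1).foldl (fun s i =>
      (PySem.List.pyRange 0 n 1).foldl (fun s j =>
        if !(pyGet2 grid i j) then
          (((((s.add (i, j)).add (i - 1, j)).add (i + 1, j)).add (i, j - 1)).add (i, j + 1))
        else s) s) PySem.Set.empty
  (PySem.List.pyRange 0 n 1).map (fun i =>
    (PySem.List.pyRange 0 n 1).map (fun j =>
      decide (0 < i) && decide (i < n - 1) && decide (0 < j) && decide (j < n - 1)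
        && !(cleared.contains (i, j))))

-- ===== PRECONDITION & SPEC =====
-- Pre_ excludes ragged grids (some row shorter than the number of rows): there A either raises
-- IndexError or, by short-circuiting, returns an all-False frame, while B reads every cell and raises.
def Pre_recede (grid : List (List Bool)) : Prop := ∀ row ∈ grid, grid.length ≤ row.length
instance (grid : List (List Bool)) : Decidable (Pre_recede grid) := by unfold Pre_recede; infer_instance
def pvWitness_recede : List (List Bool) := [[true, true, true], [true, false, true], [true, true, true]]
def Spec_recede (grid : List (List Bool)) (out : List (List Bool)) : Prop := out = recede_alt grid
instance (grid : List (List Bool)) (out : List (List Bool)) : Decidable (Spec_recede grid out) := by unfold Spec_recede; infer_instance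

-- ===== CLAIM (what is proved, stated in full; the proofs are below) =====
def Claim_equal_recede : Prop := ∀ (grid : List (List Bool)), Dom_recede grid → Pre_recede grid → Spec_recede grid (recede grid)

-- ===== LEMMAS AND PROOFS =====

/-- Membership in a foldl that conditionally adds elements to a set. -/
lemma mem_foldl_step {α β : Type} [BEq β] (x : β) (P : α → Prop)
    (step : PySem.Set β → α → PySem.Set β)
    (h : ∀ s a, x ∈ step s a ↔ P a ∨ x ∈ s) :
    ∀ (l : List α) (s0 : PySem.Set β), x ∈ l.foldl step s0 ↔ (∃ a ∈ l, P a) ∨ x ∈ s0 := by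
  intro l
  induction l with
  | nil => intro s0; simp
  | cons a l ih =>
    intro s0
    simp only [List.foldl_cons, ih, h, List.mem_cons]
    constructor
    · rintro (⟨b, hb, hP⟩ | hP | hs)
      · exact Or.inl ⟨b, Or.inr hb, hP⟩
      · exact Or.inl ⟨a, Or.inl rfl, hP⟩
      · exact Or.inr hs
    · rintro (⟨b, (rfl | hb), hP⟩ | hs)
      · exact Or.inr (Or.inl hP)
      · exact Or.inl ⟨b, hb, hP⟩
      · exact Or.inr (Or.inr hs)

/-- The plus-shaped write set of a False input cell at (i, j). -/
def plusOf (i j : Int) (x : Int × Int) : Prop :=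
  x = (i, j) ∨ x = (i - 1, j) ∨ x = (i + 1, j) ∨ x = (i, j - 1) ∨ x = (i, j + 1)

lemma mem_cleared (grid : List (List Bool)) (n : Int) (x : Int × Int) :
    x ∈ ((PySem.List.pyRange 0 n 1).foldl (fun s i =>
      (PySem.List.pyRange 0 n 1).foldl (fun s j =>
        if !(pyGet2 grid i j) then
          (((((s.add (i, j)).add (i - 1, j)).add (i + 1, j)).add (i, j - 1)).add (i, j + 1))
        else s) s) (PySem.Set.empty : PySem.Set (Int × Int))) ↔
    ∃ i, (0 ≤ i ∧ i < n) ∧ ∃ j, (0 ≤ j ∧ j < n) ∧ pyGet2 grid i j = false ∧ plusOf i j x := by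
  rw [mem_foldl_step x
    (fun i => ∃ j, (0 ≤ j ∧ j < n) ∧ pyGet2 grid i j = false ∧ plusOf i j x)
    _ ?_ _ _]
  · constructor
    · rintro (⟨i, hi, hP⟩ | hs)
      · exact ⟨i, PySem.List.mem_pyRange_one.mp hi, hP⟩
      · simp [PySem.Set.empty] at hs
    · rintro ⟨i, hi, hP⟩
      exact Or.inl ⟨i, PySem.List.mem_pyRange_one.mpr hi, hP⟩
  · intro s i
    rw [mem_foldl_step x
      (fun j => pyGet2 grid i j = false ∧ plusOf i j x)
      _ ?_ _ _]
    · constructor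
      · rintro (⟨j, hj, hP⟩ | hs)
        · exact Or.inl ⟨j, PySem.List.mem_pyRange_one.mp hj, hP⟩
        · exact Or.inr hs
      · rintro (⟨j, hj, hP⟩ | hs)
        · exact Or.inl ⟨j, PySem.List.mem_pyRange_one.mpr hj, hP⟩
        · exact Or.inr hs
    · intro s j
      cases hg : pyGet2 grid i j with
      | false =>
        simp only [hg, Bool.not_false, if_pos, PySem.Set.mem_add, plusOf]
        tauto
      | true =>
        simp only [hg, Bool.not_true, Bool.false_eq_true, if_false]
        constructor
        · intro hs; exact Or.inr hs
        · rintro (⟨h1, _⟩ | hs)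
          · exact Bool.noConfusion h1
          · exact hs

/-- A's short-circuit if-chain is the conjunction of the five tested values. -/
lemma chain_eq (a b c d e : Bool) :
    (if !a then false else if !b then false else if !c then false
     else if !d then false else if !e then false else true) = (a && b && c && d && e) := by
  cases a <;> cases b <;> cases c <;> cases d <;> cases e <;> simp

lemma cell_eq (grid : List (List Bool)) (i j : Int)
    (hi : 0 ≤ i ∧ i < (grid.length : Int)) (hj : 0 ≤ j ∧ j < (grid.length : Int)) :
    (if i = 0 ∨ j = 0 ∨ i = (grid.length : Int) - 1 ∨ j = (grid.length : Int) - 1 then false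
     else if !(pyGet2 grid (i-1) j) then false
     else if !(pyGet2 grid i (j-1)) then false
     else if !(pyGet2 grid (i+1) j) then false
     else if !(pyGet2 grid i (j+1)) then false
     else if !(pyGet2 grid i j) then false
     else true) =
    (decide (0 < i) && decide (i < (grid.length : Int) - 1) && decide (0 < j)
      && decide (j < (grid.length : Int) - 1)
      && !((PySem.List.pyRange 0 (grid.length : Int) 1).foldl (fun s i =>
        (PySem.List.pyRange 0 (grid.length : Int) 1).foldl (fun s j =>
          if !(pyGet2 grid i j) then
            (((((s.add (i, j)).add (i - 1, j)).add (i + 1, j)).add (i, j - 1)).add (i, j + 1))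
          else s) s) (PySem.Set.empty : PySem.Set (Int × Int))).contains (i, j)) := by
  set n : Int := (grid.length : Int) with hn
  set S : PySem.Set (Int × Int) := (PySem.List.pyRange 0 n 1).foldl (fun s i =>
        (PySem.List.pyRange 0 n 1).foldl (fun s j =>
          if !(pyGet2 grid i j) then
            (((((s.add (i, j)).add (i - 1, j)).add (i + 1, j)).add (i, j - 1)).add (i, j + 1))
          else s) s) (PySem.Set.empty : PySem.Set (Int × Int)) with hS
  have hmem : S.contains (i, j) = true ↔
      ∃ r, (0 ≤ r ∧ r < n) ∧ ∃ c, (0 ≤ c ∧ c < n) ∧ pyGet2 grid r c = false ∧ plusOf r c (i, j) := by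
    rw [PySem.Set.contains_iff, hS]
    exact mem_cleared grid n (i, j)
  by_cases hb : i = 0 ∨ j = 0 ∨ i = n - 1 ∨ j = n - 1
  · rw [if_pos hb]
    rcases hb with h | h | h | h <;> simp [h]
  · rw [if_neg hb]
    simp only [not_or] at hb
    obtain ⟨h1, h2, h3, h4⟩ := hb
    rw [chain_eq]
    have d1 : decide (0 < i) = true := by simp; omega
    have d2 : decide (i < n - 1) = true := by simp; omega
    have d3 : decide (0 < j) = true := by simp; omega
    have d4 : decide (j < n - 1) = true := by simp; omega
    rw [d1, d2, d3, d4]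
    simp only [Bool.true_and]
    cases hC : S.contains (i, j) with
    | true =>
      obtain ⟨r, hr, c, hc, hg, hplus⟩ := hmem.mp hC
      simp only [plusOf, Prod.mk.injEq] at hplus
      have hcases : (r = i ∧ c = j) ∨ (r = i + 1 ∧ c = j) ∨ (r = i - 1 ∧ c = j) ∨
          (r = i ∧ c = j + 1) ∨ (r = i ∧ c = j - 1) := by omega
      rcases hcases with ⟨e1, e2⟩ | ⟨e1, e2⟩ | ⟨e1, e2⟩ | ⟨e1, e2⟩ | ⟨e1, e2⟩ <;>
        subst e1 <;> subst e2 <;> simp [hg]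
    | false =>
      have hnone : ∀ r, (0 ≤ r ∧ r < n) → ∀ c, (0 ≤ c ∧ c < n) →
          pyGet2 grid r c = false → ¬ plusOf r c (i, j) := by
        intro r hr c hc hg hplus
        have h' := hmem.mpr ⟨r, hr, c, hc, hg, hplus⟩
        rw [h'] at hC
        simp at hC
      have g1 : pyGet2 grid (i-1) j = true := by
        by_contra hg; simp only [Bool.not_eq_true] at hg
        exact hnone (i-1) ⟨by omega, by omega⟩ j ⟨by omega, by omega⟩ hg
          (by unfold plusOf; right; right; left; simp only [Prod.mk.injEq, and_true]; omega)
      have g2 : pyGet2 grid i (j-1) = true := by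
        by_contra hg; simp only [Bool.not_eq_true] at hg
        exact hnone i ⟨by omega, by omega⟩ (j-1) ⟨by omega, by omega⟩ hg
          (by unfold plusOf; right; right; right; right; simp only [Prod.mk.injEq, true_and]; omega)
      have g3 : pyGet2 grid (i+1) j = true := by
        by_contra hg; simp only [Bool.not_eq_true] at hg
        exact hnone (i+1) ⟨by omega, by omega⟩ j ⟨by omega, by omega⟩ hg
          (by unfold plusOf; right; left; simp only [Prod.mk.injEq, and_true]; omega)
      have g4 : pyGet2 grid i (j+1) = true := by
        by_contra hg; simp only [Bool.not_eq_true] at hg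
        exact hnone i ⟨by omega, by omega⟩ (j+1) ⟨by omega, by omega⟩ hg
          (by unfold plusOf; right; right; right; left; simp only [Prod.mk.injEq, true_and]; omega)
      have g5 : pyGet2 grid i j = true := by
        by_contra hg; simp only [Bool.not_eq_true] at hg
        exact hnone i ⟨by omega, by omega⟩ j ⟨by omega, by omega⟩ hg
          (by unfold plusOf; left; rfl)
      simp [g1, g2, g3, g4, g5]

-- ===== VERDICT (by name: the statement is the Claim_ definition above) =====
theorem recede_spec : Claim_equal_recede := by
  intro grid _ _
  unfold Spec_recede recede recede_alt
  simp only [PySem.List.foldl_append_singleton_eq_map, List.nil_append]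
  apply List.map_congr_left
  intro i hi
  apply List.map_congr_left
  intro j hj
  rw [PySem.List.mem_pyRange_one] at hi hj
  exact cell_eq grid i j hi hj
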